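-- pv_equiv track=rewrite | github.com/aportal0/myISACcode | python/precip_Cristina/functions_analogues_PrMax.py | create_member_file_dict
-- ===== SOURCE A (Python) =====
-- from collections import defaultdict
--
-- def create_member_file_dict(paths_files, list_membs):
--     """
--     Create a dictionary mapping members to their respective file paths.
--
--     Parameters:
--     - paths_files: List of file paths.
--     - list_membs: List of member names.
--
--     Returns:
--     - A defaultdict where keys are member names and values are lists of file paths.
--     """
--     memb_files = defaultdict(list)
--     for path in paths_files:
--         for memb in list_membs:
--             if memb in path:
--                 memb_files[memb].append(path)
--                 break  # Assuming one member per file path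
--     # return with keys in alphabetical order
--     return {m: memb_files[m] for m in sorted(list_membs)}
-- ===== SOURCE B (Python) =====
-- def create_member_file_dict(paths_files, list_membs):
--     # Outer loop over members: each member takes its matching paths out of a
--     # shrinking 'remaining' pool (one partition pass per member), so per-path
--     # first-member-wins is preserved.
--     result = {m: [] for m in sorted(list_membs)}
--     remaining = paths_files
--     for memb in list_membs:
--         matches = []
--         rest = []
--         for p in remaining:
--             if memb in p:
--                 matches.append(p)
--             else:
--                 rest.append(p)
--         result[memb] += matches
--         remaining = rest
--     return result
-- ===== Notes on version B (the rewrite author's own statement) =====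
-- stated objective: alternative
-- what changed: Loops are swapped: instead of scanning the member list per path with a break and a defaultdict, B iterates members once, peeling each member's matching paths out of a shrinking 'remaining' pool, which preserves the first-member-wins tie-break without any per-path inner break.
import Mathlib
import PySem

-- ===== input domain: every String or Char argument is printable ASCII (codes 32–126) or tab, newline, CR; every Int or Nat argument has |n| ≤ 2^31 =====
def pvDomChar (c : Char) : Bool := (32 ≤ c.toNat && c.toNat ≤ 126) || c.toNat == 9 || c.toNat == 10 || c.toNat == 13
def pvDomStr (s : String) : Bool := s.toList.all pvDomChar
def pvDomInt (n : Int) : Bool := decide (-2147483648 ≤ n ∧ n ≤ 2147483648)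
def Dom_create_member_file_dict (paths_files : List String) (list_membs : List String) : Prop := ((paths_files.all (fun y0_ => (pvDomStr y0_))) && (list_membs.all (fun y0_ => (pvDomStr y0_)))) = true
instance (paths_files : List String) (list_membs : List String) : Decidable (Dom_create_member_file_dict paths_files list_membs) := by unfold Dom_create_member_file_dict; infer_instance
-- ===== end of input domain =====

-- B swaps the loops: members outer, a shrinking pool of unassigned paths inner; same result, no speed claim.


-- ===== PORT A =====
-- inner 'for memb in list_membs: if memb in path: …; break' loop
def pvAInner (path : String) : List String → PySem.Dict String (List String) → PySem.Dict String (List String)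
  | [], d => d
  | memb :: rest, d =>
      if PySem.Str.isIn memb path then d.modify memb [] (· ++ [path])
      else pvAInner path rest d

def create_member_file_dict (paths_files : List String) (list_membs : List String) : List (String × List String) :=
  let memb_files := paths_files.foldl (fun d path => pvAInner path list_membs d) PySem.Dict.empty
  ((PySem.List.sorted list_membs (fun x => x) false).foldl
      (fun d m => d.insert m (memb_files.getD m [])) PySem.Dict.empty).items

-- ===== PORT B =====
def create_member_file_dict_alt (paths_files : List String) (list_membs : List String) : List (String × List String) :=
  let result0 := (PySem.List.sorted list_membs (fun x => x) false).foldl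
      (fun d m => d.insert m ([] : List String)) PySem.Dict.empty
  (list_membs.foldl
      (fun (st : PySem.Dict String (List String) × List String) memb =>
        let pr := st.2.foldl
          (fun (acc : List String × List String) p =>
            if PySem.Str.isIn memb p then (acc.1 ++ [p], acc.2) else (acc.1, acc.2 ++ [p]))
          ([], [])
        (st.1.insert memb (st.1.getD memb [] ++ pr.1), pr.2))
      (result0, paths_files)).1.items

-- ===== PRECONDITION & SPEC =====
def Spec_create_member_file_dict (paths_files : List String) (list_membs : List String) (out : List (String × List String)) : Prop := out = create_member_file_dict_alt paths_files list_membs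
instance (paths_files : List String) (list_membs : List String) (out : List (String × List String)) : Decidable (Spec_create_member_file_dict paths_files list_membs out) := by unfold Spec_create_member_file_dict; infer_instance

-- ===== CLAIM (what is proved, stated in full; the proofs are below) =====
def Claim_equal_create_member_file_dict : Prop := ∀ (paths_files : List String) (list_membs : List String), Dom_create_member_file_dict paths_files list_membs → Spec_create_member_file_dict paths_files list_membs (create_member_file_dict paths_files list_membs)

-- ===== LEMMAS AND PROOFS =====

-- first member of membs that is a substring of p (the assignment both programs compute)
def pvFM (membs : List String) (p : String) : Option String :=
  membs.find? (fun mb => PySem.Str.isIn mb p)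

-- the break-loop of A is: modify at the first matching member (if any)
theorem pvAInner_eq (path : String) : ∀ (ms : List String) (d : PySem.Dict String (List String)),
    pvAInner path ms d = match pvFM ms path with
      | none => d
      | some mb => d.modify mb [] (· ++ [path]) := by
  intro ms
  induction ms with
  | nil => intro d; rfl
  | cons mb rest ih =>
    intro d
    by_cases h : PySem.Str.isIn mb path = true
    · rw [pvAInner, if_pos h, pvFM,
        List.find?_cons_of_pos (p := fun mb => PySem.Str.isIn mb path) h]
    · rw [pvAInner, if_neg h, pvFM,
        List.find?_cons_of_neg (p := fun mb => PySem.Str.isIn mb path) (by simpa using h), ih d, pvFM]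

-- A's grouping loop, characterised per key
theorem pvA_fold_getD (membs : List String) : ∀ (paths : List String) (d : PySem.Dict String (List String)) (m : String),
    (paths.foldl (fun d path => pvAInner path membs d) d).getD m []
      = d.getD m [] ++ paths.filter (fun p => pvFM membs p == some m) := by
  intro paths
  induction paths with
  | nil => intro d m; simp
  | cons p rest ih =>
    intro d m
    simp only [List.foldl_cons, ih, List.filter_cons]
    rw [pvAInner_eq]
    cases hfm : pvFM membs p with
    | none => simp
    | some mb =>
      by_cases hm : mb = m
      · subst hm
        simp [PySem.Dict.getD_modify_self]
      · simp [PySem.Dict.getD_modify, hm, Ne.symm hm]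

-- a fold of inserts whose value depends only on the key, per key
theorem pv_fold_insert_getD (f : String → List String) : ∀ (l : List String) (d : PySem.Dict String (List String)) (m : String),
    (l.foldl (fun d x => d.insert x (f x)) d).getD m []
      = if m ∈ l then f m else d.getD m [] := by
  intro l
  induction l with
  | nil => intro d m; simp
  | cons x t ih =>
    intro d m
    simp only [List.foldl_cons, ih, List.mem_cons]
    by_cases ht : m ∈ t
    · simp [ht]
    · by_cases hx : m = x
      · subst hx; simp [ht, PySem.Dict.getD_insert_self]
      · simp [ht, hx, PySem.Dict.getD_insert_of_ne _ _ _ hx]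

-- B's one-pass partition of 'remaining' is the two filters
theorem pvPartition (memb : String) : ∀ (l : List String) (a b : List String),
    l.foldl
      (fun (acc : List String × List String) p =>
        if PySem.Str.isIn memb p then (acc.1 ++ [p], acc.2) else (acc.1, acc.2 ++ [p]))
      (a, b)
    = (a ++ l.filter (fun p => PySem.Str.isIn memb p), b ++ l.filter (fun p => !PySem.Str.isIn memb p)) := by
  intro l
  induction l with
  | nil => intro a b; simp
  | cons p t ih =>
    intro a b
    rw [List.foldl_cons, List.filter_cons, List.filter_cons]
    by_cases h : PySem.Str.isIn memb p = true
    · rw [if_pos h, ih, h]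
      simp
    · have h' : PySem.Str.isIn memb p = false := by simpa using h
      rw [if_neg h, ih, h']
      simp

-- the partition step is the two-filter step
theorem pvB_step_eq :
    (fun (st : PySem.Dict String (List String) × List String) memb =>
        let pr := st.2.foldl
          (fun (acc : List String × List String) p =>
            if PySem.Str.isIn memb p then (acc.1 ++ [p], acc.2) else (acc.1, acc.2 ++ [p]))
          ([], [])
        (st.1.insert memb (st.1.getD memb [] ++ pr.1), pr.2))
    = (fun (st : PySem.Dict String (List String) × List String) memb =>
        (st.1.insert memb (st.1.getD memb [] ++ st.2.filter (fun p => PySem.Str.isIn memb p)),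
         st.2.filter (fun p => !PySem.Str.isIn memb p))) := by
  funext st memb
  simp only [pvPartition, List.nil_append]

-- B's member loop keeps the key list of result0 (every member is already a key)
theorem pvB_fold_keys : ∀ (ms : List String) (result : PySem.Dict String (List String)) (remaining : List String),
    (∀ x ∈ ms, result.contains x = true) →
    (ms.foldl
      (fun (st : PySem.Dict String (List String) × List String) memb =>
        (st.1.insert memb (st.1.getD memb [] ++ st.2.filter (fun p => PySem.Str.isIn memb p)),
         st.2.filter (fun p => !PySem.Str.isIn memb p)))
      (result, remaining)).1.keys = result.keys := by
  intro ms
  induction ms with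
  | nil => intro result remaining _; rfl
  | cons mb rest ih =>
    intro result remaining h
    have hmb : result.contains mb = true := h mb (by simp)
    simp only [List.foldl_cons]
    rw [ih]
    · exact PySem.Dict.keys_insert_of_contains _ _ hmb
    · intro x hx
      rw [PySem.Dict.contains_insert]
      simp [h x (List.mem_cons_of_mem _ hx)]

-- B's member loop, characterised per key
theorem pvB_fold_getD : ∀ (ms : List String) (result : PySem.Dict String (List String)) (remaining : List String) (m : String),
    (ms.foldl
      (fun (st : PySem.Dict String (List String) × List String) memb =>
        (st.1.insert memb (st.1.getD memb [] ++ st.2.filter (fun p => PySem.Str.isIn memb p)),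
         st.2.filter (fun p => !PySem.Str.isIn memb p)))
      (result, remaining)).1.getD m []
      = result.getD m [] ++ remaining.filter (fun p => pvFM ms p == some m) := by
  intro ms
  induction ms with
  | nil => intro result remaining m; simp [pvFM]
  | cons mb rest ih =>
    intro result remaining m
    simp only [List.foldl_cons, ih, List.filter_filter]
    by_cases hm : m = mb
    · subst hm
      rw [PySem.Dict.getD_insert_self]
      have h1 : remaining.filter (fun p => (pvFM rest p == some m) && !PySem.Str.isIn m p) = [] := by
        rw [List.filter_eq_nil_iff]
        intro p _ hp
        simp only [Bool.and_eq_true, Bool.not_eq_true', beq_iff_eq] at hp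
        obtain ⟨hfm, hni⟩ := hp
        have := List.find?_some hfm
        simp only [hni] at this
        exact Bool.false_ne_true this
      have h2 : remaining.filter (fun p => pvFM (m :: rest) p == some m)
          = remaining.filter (fun p => PySem.Str.isIn m p) := by
        apply List.filter_congr
        intro p _
        by_cases hin : PySem.Str.isIn m p = true
        · rw [pvFM, List.find?_cons_of_pos (p := fun mb => PySem.Str.isIn mb p) hin, hin]
          simp
        · have hin' : PySem.Str.isIn m p = false := by simpa using hin
          rw [pvFM, List.find?_cons_of_neg (p := fun mb => PySem.Str.isIn mb p) (by simpa using hin), hin']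
          cases hfm : List.find? (fun mb => PySem.Str.isIn mb p) rest with
          | none => simp
          | some q =>
            have hq := List.find?_some hfm
            simp only [beq_eq_false_iff_ne, ne_eq, Option.some.injEq]
            rintro rfl
            exact Bool.false_ne_true (hin' ▸ hq)
      rw [h1, List.append_nil, h2]
    · rw [PySem.Dict.getD_insert_of_ne _ _ _ hm]
      congr 1
      apply List.filter_congr
      intro p _
      by_cases hin : PySem.Str.isIn mb p = true
      · simp only [pvFM]
        rw [List.find?_cons_of_pos (p := fun mb => PySem.Str.isIn mb p) hin, hin]
        simp [Ne.symm hm]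
      · have hin' : PySem.Str.isIn mb p = false := by simpa using hin
        simp only [pvFM]
        rw [List.find?_cons_of_neg (p := fun mb => PySem.Str.isIn mb p) (by simpa using hin), hin']
        simp

-- ===== VERDICT (by name: the statement is the Claim_ definition above) =====
theorem create_member_file_dict_spec : Claim_equal_create_member_file_dict := by
  intro paths membs _
  unfold Spec_create_member_file_dict create_member_file_dict create_member_file_dict_alt
  dsimp only
  rw [pvB_step_eq]
  set S := PySem.List.sorted membs (fun x => x) false with hS
  set MF := List.foldl (fun d path => pvAInner path membs d) PySem.Dict.empty paths with hMF
  set dA := List.foldl (fun d m => d.insert m (MF.getD m [])) PySem.Dict.empty S with hdA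
  set r0 := List.foldl (fun d m => d.insert m ([] : List String)) PySem.Dict.empty S with hr0
  set dB := (List.foldl
      (fun (st : PySem.Dict String (List String) × List String) memb =>
        (st.1.insert memb (st.1.getD memb [] ++ st.2.filter (fun p => PySem.Str.isIn memb p)),
         st.2.filter (fun p => !PySem.Str.isIn memb p)))
      (r0, paths) membs).1 with hdB
  have hk0 : r0.keys = PySem.Set.ofList S := by
    rw [hr0]
    have h := PySem.Dict.keys_foldl_insert (ν := List String) S (fun _ _ => []) PySem.Dict.empty
    simpa [PySem.Set.ofList_eq_foldl, PySem.Set.update] using h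
  have hkA : dA.keys = PySem.Set.ofList S := by
    rw [hdA]
    have h := PySem.Dict.keys_foldl_insert (ν := List String) S (fun _ x => MF.getD x []) PySem.Dict.empty
    simpa [PySem.Set.ofList_eq_foldl, PySem.Set.update] using h
  have hall : ∀ x ∈ membs, r0.contains x = true := by
    intro x hx
    rw [PySem.Dict.contains_iff_mem_keys, hk0, PySem.Set.mem_ofList, hS, PySem.List.mem_sorted]
    exact hx
  have hkB : dB.keys = r0.keys := pvB_fold_keys membs r0 paths hall
  have hnd : (PySem.Set.ofList S).Nodup := PySem.Set.nodup_ofList S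
  rw [PySem.Dict.items_eq_map_keys dA (hkA ▸ hnd) [],
      PySem.Dict.items_eq_map_keys dB ((hkB.trans hk0) ▸ hnd) [],
      hkA, hkB, hk0]
  apply List.map_congr_left
  intro k hk
  have hkSl : k ∈ S := (PySem.Set.mem_ofList S k).mp hk
  have hkM : k ∈ membs := by
    rw [hS, PySem.List.mem_sorted] at hkSl
    exact hkSl
  have hkSl' : k ∈ S := by rw [hS, PySem.List.mem_sorted]; exact hkM
  have hA : dA.getD k [] = MF.getD k [] := by
    rw [hdA, pv_fold_insert_getD (fun x => MF.getD x [])]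
    simp [hkSl']
  have hMFv : MF.getD k [] = paths.filter (fun p => pvFM membs p == some k) := by
    rw [hMF, pvA_fold_getD]
    simp
  have hB : dB.getD k [] = paths.filter (fun p => pvFM membs p == some k) := by
    rw [hdB, pvB_fold_getD]
    rw [hr0, pv_fold_insert_getD (fun _ => [])]
    simp [hkSl']
  simp [hA, hMFv, hB]
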